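-- pv_equiv track=rewrite | github.com/YingmingMa/PIMeval-PIMbench_Rowhammer | tests/test-H-add/H-add.py | h_sub
-- ===== SOURCE A (Python) =====
-- MASK = 0xFFFFFFFF
--
-- def h_sub(a: int, b: int) -> int:
--     """Performs 32-bit unsigned subtraction using XOR and AND (H-add logic)."""
--     MASK = 0xFFFFFFFF
--     a &= MASK
--     b &= MASK
--
--     xor = a
--     carry = b
--     for i in range(32):
--         And = (~xor) & carry
--         xor = xor ^ carry
--         carry = (And << 1) & MASK
--
--     return xor & MASK  # Ensure result is 32-bit
-- ===== SOURCE B (Python) =====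
-- MASK = 0xFFFFFFFF
--
-- def h_sub(a: int, b: int) -> int:
--     """32-bit unsigned subtraction, computed directly modulo 2**32."""
--     return (a - b) & MASK
-- ===== Notes on version B (the rewrite author's own statement) =====
-- stated objective: simpler
-- what changed: The 32-iteration XOR/AND ripple-borrow loop is replaced by the single closed-form expression (a - b) & 0xFFFFFFFF, which is subtraction modulo 2^32 directly.
import Mathlib
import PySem

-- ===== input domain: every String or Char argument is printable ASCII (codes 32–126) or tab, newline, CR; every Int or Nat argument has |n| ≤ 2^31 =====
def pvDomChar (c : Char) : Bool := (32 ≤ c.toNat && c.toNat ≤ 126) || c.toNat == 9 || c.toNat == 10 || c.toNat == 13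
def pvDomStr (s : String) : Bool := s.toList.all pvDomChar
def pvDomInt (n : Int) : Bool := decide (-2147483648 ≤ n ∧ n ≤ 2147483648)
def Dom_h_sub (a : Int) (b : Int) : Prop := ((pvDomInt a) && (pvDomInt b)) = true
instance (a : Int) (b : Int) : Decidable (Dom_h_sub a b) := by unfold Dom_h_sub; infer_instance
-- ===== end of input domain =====

-- B replaces A's 32-iteration XOR/AND ripple-borrow loop by the single closed form (a - b) & 0xFFFFFFFF (simpler).

-- ===== PORT A =====
-- literal port of A: mask both inputs, then 32 iterations of the ripple-borrow step
def h_sub (a : Int) (b : Int) : Int :=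
  let a' := PySem.Int.band a 4294967295
  let b' := PySem.Int.band b 4294967295
  let st := (PySem.List.pyRange 0 32 1).foldl
    (fun (st : Int × Int) (_ : Int) =>
      let And := PySem.Int.band (Int.not st.1) st.2
      let xor := PySem.Int.bxor st.1 st.2
      let carry := PySem.Int.band (And <<< (1 : Nat)) 4294967295
      (xor, carry)) (a', b')
  PySem.Int.band st.1 4294967295

-- ===== PORT B =====
def h_sub_alt (a : Int) (b : Int) : Int :=
  PySem.Int.band (a - b) 4294967295

-- ===== PRECONDITION & SPEC =====
def Spec_h_sub (a : Int) (b : Int) (out : Int) : Prop := out = h_sub_alt a b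
instance (a : Int) (b : Int) (out : Int) : Decidable (Spec_h_sub a b out) := by unfold Spec_h_sub; infer_instance

-- ===== CLAIM (what is proved, stated in full; the proofs are below) =====
def Claim_equal_h_sub : Prop := ∀ (a : Int) (b : Int), Dom_h_sub a b → Spec_h_sub a b (h_sub a b)

-- ===== LEMMAS AND PROOFS =====

-- masking with 0xFFFFFFFF is reduction modulo 2^32 (on all of Int, Python-style)
theorem band_mask_eq_mod (z : Int) : PySem.Int.band z 4294967295 = z % 4294967296 := by
  by_cases hz : 0 ≤ z
  · obtain ⟨n, rfl⟩ := Int.eq_ofNat_of_zero_le hz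
    have h0 : (4294967295 : Int) = ((4294967295 : Nat) : Int) := by norm_num
    rw [h0, PySem.Int.band_natCast]
    have h : n &&& 4294967295 = n % 4294967296 := by
      simpa using Nat.and_two_pow_sub_one_eq_mod n 32
    rw [h]
    omega
  · unfold PySem.Int.band
    rw [if_neg hz, if_pos (by norm_num : (0 : Int) ≤ 4294967295)]
    have ht : (4294967295 : Int).toNat = 4294967295 := rfl
    rw [ht]
    set m : Nat := (-z - 1).toNat with hm
    have h1 : 4294967295 &&& m = m % 4294967296 := by
      rw [Nat.and_comm]
      simpa using Nat.and_two_pow_sub_one_eq_mod m 32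
    rw [h1]
    omega

-- classic carry identity: x + c = (x XOR c) + 2 * (x AND c)
theorem nat_add_eq_xor_add_two_mul_and (x : Nat) : ∀ c : Nat, x + c = (x ^^^ c) + 2 * (x &&& c) := by
  induction x using Nat.strong_induction_on with
  | _ x IH =>
    intro c
    rcases Nat.eq_zero_or_pos x with hx | hx
    · subst hx; simp
    · have hlt : x / 2 < x := Nat.div_lt_self hx (by norm_num)
      have IH2 := IH (x / 2) hlt (c / 2)
      have hxd : (x ^^^ c) / 2 = x / 2 ^^^ c / 2 := Nat.xor_div_two
      have had : (x &&& c) / 2 = x / 2 &&& c / 2 := Nat.and_div_two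
      have hxm : (x ^^^ c) % 2 = x % 2 ^^^ c % 2 := by
        have := @Nat.xor_mod_two_pow x c 1
        simpa using this
      have ham : (x &&& c) % 2 = x % 2 &&& c % 2 := by
        have := @Nat.and_mod_two_pow x c 1
        simpa using this
      generalize hu : x ^^^ c = u at hxd hxm
      generalize hv : x &&& c = v at had ham
      generalize hu2 : x / 2 ^^^ c / 2 = u2 at hxd IH2
      generalize hv2 : x / 2 &&& c / 2 = v2 at had IH2
      rcases Nat.mod_two_eq_zero_or_one x with h1 | h1 <;>
        rcases Nat.mod_two_eq_zero_or_one c with h2 | h2 <;>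
        rw [h1, h2] at hxm ham <;>
        simp only [Nat.zero_xor, Nat.xor_zero, Nat.zero_and, Nat.and_zero,
          show (1 : Nat) ^^^ 1 = 0 from rfl, show (1 : Nat) &&& 1 = 1 from rfl] at hxm ham <;>
        omega

-- the Nat-level ripple step that the Int loop body computes on in-range states
def stepN (p : Nat × Nat) : Nat × Nat :=
  (p.1 ^^^ p.2, (2 * (p.2 - (p.2 &&& p.1))) % 4294967296)

-- the Int loop body agrees with stepN on natCast states
theorem body_eq_stepN (x c : Nat) :
    (PySem.Int.bxor (↑x : Int) (↑c : Int),
      PySem.Int.band ((PySem.Int.band (Int.not (↑x : Int)) (↑c : Int)) <<< (1 : Nat)) 4294967295)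
    = ((↑(stepN (x, c)).1 : Int), (↑(stepN (x, c)).2 : Int)) := by
  have hnot : Int.not (↑x : Int) = -(x : Int) - 1 := by
    simp [Int.not]
    omega
  have hAnd : PySem.Int.band (Int.not (↑x : Int)) (↑c : Int) = ↑(c - (c &&& x)) := by
    rw [hnot]
    unfold PySem.Int.band
    have hneg : ¬ (0 : Int) ≤ -(x : Int) - 1 := by omega
    have hc : (0 : Int) ≤ (c : Int) := by positivity
    rw [if_neg hneg, if_pos hc]
    have e1 : (-(-(x : Int) - 1) - 1) = ((x : Nat) : Int) := by ring
    rw [e1, Int.toNat_natCast, Int.toNat_natCast]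
  simp only [stepN, Prod.mk.injEq]
  constructor
  · rw [PySem.Int.bxor_natCast]
  · rw [hAnd, band_mask_eq_mod, Int.shiftLeft_eq]
    generalize c - (c &&& x) = k
    have e2 : ((k : Nat) : Int) * 2 ^ 1 = ((2 * k : Nat) : Int) := by push_cast; ring
    rw [e2]
    omega

-- a fold whose body ignores the list elements is function iteration
theorem foldl_const_eq_iterate {α β : Type} (F : β → β) (l : List α) (init : β) :
    l.foldl (fun st _ => F st) init = F^[l.length] init := by
  induction l generalizing init with
  | nil => rfl
  | cons hd tl ih => simp [List.foldl_cons, ih, Function.iterate_succ_apply]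

-- the loop invariant: both components in range, the carry has i low zero bits,
-- and (x - c) is the wanted difference modulo 2^32
def InvN (A B : Int) (i : Nat) (p : Nat × Nat) : Prop :=
  p.1 < 4294967296 ∧ p.2 < 4294967296 ∧ 2 ^ i ∣ p.2 ∧
    ((p.1 : Int) - (p.2 : Int)) % 4294967296 = (A - B) % 4294967296

theorem stepN_inv {A B : Int} {i : Nat} {p : Nat × Nat}
    (h : InvN A B i p) : InvN A B (i + 1) (stepN p) := by
  obtain ⟨hx, hc, hdvd, hmod⟩ := h
  obtain ⟨x, c⟩ := p
  simp only [InvN, stepN] at *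
  have hxor_lt : x ^^^ c < 4294967296 := by
    have h1 : (x ^^^ c) % 2 ^ 32 = x % 2 ^ 32 ^^^ c % 2 ^ 32 := Nat.xor_mod_two_pow
    have h2 : x % 2 ^ 32 = x := Nat.mod_eq_of_lt (by norm_num at hx ⊢; omega)
    have h3 : c % 2 ^ 32 = c := Nat.mod_eq_of_lt (by norm_num at hc ⊢; omega)
    have h4 : (x ^^^ c) % 2 ^ 32 < 2 ^ 32 := Nat.mod_lt _ (by norm_num)
    rw [h2, h3] at h1
    generalize hu : x ^^^ c = u at h1 h4
    norm_num at h4 ⊢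
    omega
  refine ⟨hxor_lt, Nat.mod_lt _ (by norm_num), ?_, ?_⟩
  · -- 2^(i+1) divides the new carry
    have hand : 2 ^ i ∣ (c &&& x) := by
      have h1 : (c &&& x) % 2 ^ i = c % 2 ^ i &&& x % 2 ^ i := Nat.and_mod_two_pow
      have h2 : c % 2 ^ i = 0 := Nat.dvd_iff_mod_eq_zero.mp hdvd
      rw [h2, Nat.zero_and] at h1
      exact Nat.dvd_iff_mod_eq_zero.mpr h1
    have hsub : 2 ^ i ∣ (c - (c &&& x)) := Nat.dvd_sub hdvd hand
    have hdd : (2 : Nat) ^ (i + 1) ∣ 2 * (c - (c &&& x)) := by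
      rw [pow_succ, mul_comm (2 ^ i) 2]
      exact Nat.mul_dvd_mul_left 2 hsub
    by_cases hle : i + 1 ≤ 32
    · have hdd32 : (2 : Nat) ^ (i + 1) ∣ 4294967296 := by
        have e : (4294967296 : Nat) = 2 ^ 32 := by norm_num
        rw [e]
        exact Nat.pow_dvd_pow 2 hle
      have := Nat.mod_mod_of_dvd (2 * (c - (c &&& x))) hdd32
      rw [Nat.dvd_iff_mod_eq_zero]
      rw [this]
      exact Nat.dvd_iff_mod_eq_zero.mp hdd
    · -- i ≥ 32: the carry is divisible by 2^32 and < 2^32 already at step i, so it is 0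
      have hdd32 : (2 : Nat) ^ 32 ∣ c := by
        refine dvd_trans ?_ hdvd
        exact Nat.pow_dvd_pow 2 (by omega)
      have hc0 : c = 0 := Nat.eq_zero_of_dvd_of_lt hdd32 (by norm_num at hc ⊢; omega)
      subst hc0
      simp
  · -- the difference modulo 2^32 is preserved
    have hkey := nat_add_eq_xor_add_two_mul_and x c
    have hle : c &&& x ≤ c := Nat.and_le_left
    have hcomm : x &&& c = c &&& x := Nat.and_comm x c
    rw [hcomm] at hkey
    generalize hu : x ^^^ c = u at hkey ⊢
    generalize hv : c &&& x = v at hkey hle ⊢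
    omega

theorem stepN_iterate_inv (A B : Int) (p : Nat × Nat) (h : InvN A B 0 p) (n : Nat) :
    InvN A B n (stepN^[n] p) := by
  induction n with
  | zero => simpa using h
  | succ k ih =>
    rw [Function.iterate_succ_apply']
    exact stepN_inv ih

-- lift stepN iteration through the natCast pairing of the Int loop body
theorem iterate_body_eq (n : Nat) (x c : Nat) :
    (fun (st : Int × Int) =>
      (PySem.Int.bxor st.1 st.2,
        PySem.Int.band ((PySem.Int.band (Int.not st.1) st.2) <<< (1 : Nat)) 4294967295))^[n]
      ((↑x : Int), (↑c : Int))
    = ((↑(stepN^[n] (x, c)).1 : Int), (↑(stepN^[n] (x, c)).2 : Int)) := by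
  induction n generalizing x c with
  | zero => rfl
  | succ k ih =>
    rw [Function.iterate_succ_apply, Function.iterate_succ_apply]
    have hb := body_eq_stepN x c
    simp only at hb
    rw [hb]
    exact ih (stepN (x, c)).1 (stepN (x, c)).2

theorem h_sub_eq_mod (a b : Int) : h_sub a b = (a - b) % 4294967296 := by
  unfold h_sub
  simp only [band_mask_eq_mod a, band_mask_eq_mod b]
  have hlen : (PySem.List.pyRange 0 32 1).length = 32 := by decide
  rw [foldl_const_eq_iterate
    (fun (st : Int × Int) =>
      (PySem.Int.bxor st.1 st.2,
        PySem.Int.band ((PySem.Int.band (Int.not st.1) st.2) <<< (1 : Nat)) 4294967295)), hlen]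
  set na := (a % 4294967296).toNat with hna
  set nb := (b % 4294967296).toNat with hnb
  have hea : a % 4294967296 = (na : Int) := by omega
  have heb : b % 4294967296 = (nb : Int) := by omega
  rw [hea, heb, iterate_body_eq 32 na nb]
  rw [band_mask_eq_mod]
  have hinv0 : InvN a b 0 (na, nb) := by
    refine ⟨by omega, by omega, by simp, by simp only; omega⟩
  have hinv := stepN_iterate_inv a b (na, nb) hinv0 32
  obtain ⟨hx, hc, hz, hm⟩ := hinv
  have hc0 : (stepN^[32] (na, nb)).2 = 0 :=
    Nat.eq_zero_of_dvd_of_lt (by norm_num at hz ⊢; exact hz) hc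
  rw [hc0] at hm
  simp only [Nat.cast_zero, sub_zero] at hm
  omega

theorem h_sub_alt_eq_mod (a b : Int) : h_sub_alt a b = (a - b) % 4294967296 := by
  unfold h_sub_alt
  exact band_mask_eq_mod (a - b)

-- ===== VERDICT (by name: the statement is the Claim_ definition above) =====
theorem h_sub_spec : Claim_equal_h_sub := by
  intro a b _
  unfold Spec_h_sub
  rw [h_sub_eq_mod, h_sub_alt_eq_mod]
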